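-- pv_equiv track=rewrite | github.com/judy2k/advent-of-code | 2024/day_04/python/part1.py | all_lines
-- ===== SOURCE A (Python) =====
-- import itertools
--
-- def all_lines(input_lines):
--     return and_reversed(
--         itertools.chain(
--             [line for line in input_lines],
--             ["".join(col) for col in (zip(*input_lines))],
--             ["".join(col) for col in (diagonal(input_lines))],
--             [
--                 "".join(col)
--                 for col in reversed(list(diagonal(list(reversed(input_lines)))))
--             ],
--         )
--     )
--
-- def and_reversed(inputs):
--     for input in inputs:
--         yield input
--         yield "".join(reversed(input))
--
-- def diagonal(input_lines):
--     line_len = len(input_lines[0])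
--     for start_x in range(line_len - 1, 0, -1):
--         line = []
--         x, y = start_x, 0
--         while x < line_len and y < len(input_lines):
--             line.append(input_lines[y][x])
--             x += 1
--             y += 1
--         yield "".join(line)
--
--     for start_y in range(len(input_lines)):
--         line = []
--         x, y = 0, start_y
--         while x < line_len and y < len(input_lines):
--             line.append(input_lines[y][x])
--             x += 1
--             y += 1
--         yield "".join(line)
-- ===== SOURCE B (Python) =====
-- def all_lines(input_lines):
--     rows = len(input_lines)
--     cols = len(input_lines[0])
--     # one scan: bucket every cell by its diagonal index
--     main = {}   # key x - y : cells in increasing-y order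
--     anti = {}   # key x + y : cells in increasing-y order
--     for y in range(rows):
--         for x in range(cols):
--             c = input_lines[y][x]
--             main.setdefault(x - y, []).append(c)
--             anti.setdefault(x + y, []).append(c)
--
--     def gen():
--         for line in input_lines:
--             yield line
--             yield line[::-1]
--         for col in zip(*input_lines):
--             s = "".join(col)
--             yield s
--             yield s[::-1]
--         # main diagonals: those starting on the top row (rightmost first, x=cols-1..1),
--         # then those starting on the left column (top to bottom, keys 0..-(rows-1))
--         for k in [*range(cols - 1, 0, -1), *range(0, -rows, -1)]:
--             s = "".join(main.get(k, []))
--             yield s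
--             yield s[::-1]
--         # anti diagonals: those ending on the left column (keys 0..rows-1),
--         # then those ending on the bottom row (keys rows..rows+cols-2),
--         # each read in increasing-x order
--         for k in [*range(rows), *range(rows, rows + cols - 1)]:
--             s = "".join(reversed(anti.get(k, [])))
--             yield s
--             yield s[::-1]
--
--     return gen()
-- ===== Notes on version B (the rewrite author's own statement) =====
-- stated objective: idiomatic
-- what changed: A's two pointer-walking diagonal() generator passes (one per orientation, walking x,y pointers per start cell, plus a reverse-list-reverse trick for the anti family) are replaced by one y,x scan that buckets every cell into two dicts-of-lists keyed by x-y and x+y, then emits the buckets (anti buckets reversed) in A's exact order; rows, columns via zip, and the yield-then-reverse wrapping are kept.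
import Mathlib
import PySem

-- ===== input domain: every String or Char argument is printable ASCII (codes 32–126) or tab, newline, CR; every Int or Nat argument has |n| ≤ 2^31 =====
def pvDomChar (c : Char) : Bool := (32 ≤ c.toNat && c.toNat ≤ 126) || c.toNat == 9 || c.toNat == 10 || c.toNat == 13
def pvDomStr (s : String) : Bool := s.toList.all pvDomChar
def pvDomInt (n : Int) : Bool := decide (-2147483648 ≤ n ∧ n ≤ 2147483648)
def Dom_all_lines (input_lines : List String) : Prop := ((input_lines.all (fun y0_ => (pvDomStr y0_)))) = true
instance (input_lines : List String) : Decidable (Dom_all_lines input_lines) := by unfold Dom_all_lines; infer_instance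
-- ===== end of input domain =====

-- B replaces A's pointer-walking diagonal() generators by one scan that buckets every cell
-- into dict-of-lists keyed by x-y (main diagonals) and x+y (anti diagonals); idiomatic, same cost.
-- Both Pythons return a generator; it is compared (and ported) as the list of yielded strings.

-- ===== PORT A =====
-- shared with port B (the two Pythons contain these identical expressions):
-- "".join(reversed(s))
def pvRev (s : String) : String := String.ofList s.toList.reverse
-- input_lines[y][x]; always in range under Pre_ (Python raises outside, excluded there)
def pvCharAt (g : List String) (y x : Nat) : Char := ((g.getD y "").toList.getD x ' ')
-- ["".join(col) for col in zip(*input_lines)] : columns up to the minimum row length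
def pvZipCols (g : List String) : List String :=
  (List.range (((g.map (fun r => r.toList.length)).min?).getD 0)).map
    (fun i => String.ofList (g.map (fun r => r.toList.getD i ' ')))
-- for input in inputs: yield input; yield "".join(reversed(input))
def pvAndReversed (l : List String) : List String := l.flatMap (fun s => [s, pvRev s])

-- the while loop of diagonal(): walk (x,y) -> (x+1,y+1) while x < line_len and y < rows
def pvDiagWalk (g : List String) (lineLen : Nat) (x y : Nat) : List Char :=
  if _h : x < lineLen ∧ y < g.length then
    pvCharAt g y x :: pvDiagWalk g lineLen (x + 1) (y + 1)
  else []
termination_by lineLen - x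
decreasing_by omega

-- range(n - 1, 0, -1) = [n-1, ..., 1]
def pvDownRange (n : Nat) : List Nat := (List.range' 1 (n - 1)).reverse

-- def diagonal(input_lines): line_len = len(input_lines[0]) (g[0] exists under Pre_)
def pvDiagonal (g : List String) : List String :=
  let lineLen := (g.headD "").toList.length
  (pvDownRange lineLen).map (fun sx => String.ofList (pvDiagWalk g lineLen sx 0)) ++
  (List.range g.length).map (fun sy => String.ofList (pvDiagWalk g lineLen 0 sy))

def all_lines (input_lines : List String) : List String :=
  pvAndReversed
    (input_lines ++ pvZipCols input_lines ++ pvDiagonal input_lines ++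
      (pvDiagonal input_lines.reverse).reverse)

-- ===== PORT B =====
-- the nested y/x scan, flattened to its (key, char) stream; main key x - y
def pvMainPairs (g : List String) (rows cols : Nat) : List (Int × Char) :=
  (List.range rows).flatMap
    (fun (y : Nat) => (List.range cols).map (fun (x : Nat) => ((x : Int) - (y : Int), pvCharAt g y x)))
-- anti key x + y
def pvAntiPairs (g : List String) (rows cols : Nat) : List (Int × Char) :=
  (List.range rows).flatMap
    (fun (y : Nat) => (List.range cols).map (fun (x : Nat) => ((x : Int) + (y : Int), pvCharAt g y x)))
-- d.setdefault(k, []).append(c) = d.modify k [] (· ++ [c])  (same value, same key position)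
def pvBucket (ps : List (Int × Char)) : PySem.Dict Int (List Char) :=
  ps.foldl (fun d p => d.modify p.1 [] (· ++ [p.2])) PySem.Dict.empty

-- [*range(cols - 1, 0, -1), *range(0, -rows, -1)]
def pvMainKeys (rows cols : Nat) : List Int :=
  (pvDownRange cols).map (fun sx => Int.ofNat sx) ++ (List.range rows).map (fun sy => -(Int.ofNat sy))
-- [*range(rows), *range(rows, rows + cols - 1)]
def pvAntiKeys (rows cols : Nat) : List Nat := List.range rows ++ List.range' rows (cols - 1)

def all_lines_alt (input_lines : List String) : List String :=
  let rows := input_lines.length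
  let cols := (input_lines.headD "").toList.length   -- len(input_lines[0]); Pre_ excludes []
  let main := pvBucket (pvMainPairs input_lines rows cols)
  let anti := pvBucket (pvAntiPairs input_lines rows cols)
  (input_lines.flatMap (fun l => [l, pvRev l])) ++
  ((pvZipCols input_lines).flatMap (fun s => [s, pvRev s])) ++
  ((pvMainKeys rows cols).flatMap
    (fun k => let s := String.ofList (main.getD k []); [s, pvRev s])) ++
  ((pvAntiKeys rows cols).flatMap
    (fun (k : Nat) => let s := String.ofList (anti.getD (k : Int) []).reverse; [s, pvRev s]))

-- ===== PRECONDITION & SPEC =====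
-- Pre_ is exactly where the Python A returns: A raises IndexError on the empty list
-- (input_lines[0]) and on grids where some row is shorter than the first or the last row
-- (the diagonal walks index every cell of the rows × len(first row) rectangle, and the
-- reversed pass the rows × len(last row) rectangle).
def Pre_all_lines (input_lines : List String) : Prop :=
  input_lines ≠ [] ∧
  (input_lines.getLast?.getD "").toList.length = (input_lines.headD "").toList.length ∧
  ∀ r ∈ input_lines, (input_lines.headD "").toList.length ≤ r.toList.length
instance (input_lines : List String) : Decidable (Pre_all_lines input_lines) := by
  unfold Pre_all_lines; infer_instance

def pvWitness_all_lines : List String := ["ab", "cd"]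

def Spec_all_lines (input_lines : List String) (out : List String) : Prop := out = all_lines_alt input_lines
instance (input_lines : List String) (out : List String) : Decidable (Spec_all_lines input_lines out) := by unfold Spec_all_lines; infer_instance

-- ===== CLAIM (what is proved, stated in full; the proofs are below) =====
def Claim_equal_all_lines : Prop := ∀ (input_lines : List String), Dom_all_lines input_lines → Pre_all_lines input_lines → Spec_all_lines input_lines (all_lines input_lines)

-- ===== LEMMAS AND PROOFS =====

lemma map_range_reverse {α : Type} (n : Nat) (f : Nat → α) :
    ((List.range n).map f).reverse = (List.range n).map (fun i => f (n - 1 - i)) := by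
  apply List.ext_getElem
  · simp
  · intro i h1 h2
    simp only [List.getElem_reverse, List.getElem_map, List.getElem_range,
      List.length_map, List.length_range] at *

lemma range_filter_beq (n m : Nat) :
    (List.range n).filter (fun x => x == m) = if m < n then [m] else [] := by
  induction n with
  | zero => simp
  | succ n ih =>
    rw [List.range_succ, List.filter_append, ih]
    by_cases h : m < n
    · simp [h, Nat.lt_succ_of_lt h, Nat.ne_of_gt h]
    · by_cases h2 : m = n
      · simp [h2]
      · have h3 : ¬ m < n + 1 := by omega
        simp [h, h3, Ne.symm h2]

lemma flatMap_window {α : Type} (rows a b : Nat) (f : Nat → α) :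
    (List.range rows).flatMap (fun y => if a ≤ y ∧ y < b then [f y] else []) =
    (List.range (min b rows - a)).map (fun t => f (a + t)) := by
  induction rows with
  | zero => simp
  | succ n ih =>
    rw [List.range_succ, List.flatMap_append, ih]
    simp only [List.flatMap_cons, List.flatMap_nil, List.append_nil]
    by_cases hb : n < b
    · have h1 : min b (n+1) = n + 1 := by omega
      have h2 : min b n = n := by omega
      rw [h1, h2]
      by_cases ha : a ≤ n
      · have h3 : n + 1 - a = (n - a) + 1 := by omega
        rw [h3, List.range_succ, List.map_append, if_pos ⟨ha, hb⟩]
        simp only [List.map_cons, List.map_nil, List.append_cancel_left_eq]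
        show [f n] = [f (a + (n - a))]
        congr 2
        omega
      · have h3 : n + 1 - a = 0 := by omega
        have h4 : n - a = 0 := by omega
        rw [h3, h4, if_neg (by omega)]
        simp
    · have h1 : min b (n+1) = min b n := by omega
      rw [h1, if_neg (by omega)]
      simp

lemma pvDiagWalk_eq (g : List String) (L x y : Nat) :
    pvDiagWalk g L x y =
    (List.range (min (L - x) (g.length - y))).map (fun t => pvCharAt g (y + t) (x + t)) := by
  fun_induction pvDiagWalk g L x y with
  | case1 x y h ih =>
    have hn : min (L - x) (g.length - y) = (min (L - (x+1)) (g.length - (y+1))) + 1 := by omega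
    rw [hn, ih, List.range_succ_eq_map, List.map_cons, List.map_map]
    refine congrArg₂ List.cons (by simp) ?_
    refine List.map_congr_left ?_
    intro t ht
    simp only [Function.comp_def, Nat.succ_eq_add_one]
    have h1 : y + 1 + t = y + (t + 1) := by omega
    have h2 : x + 1 + t = x + (t + 1) := by omega
    rw [h1, h2]
  | case2 x y h =>
    have hn : min (L - x) (g.length - y) = 0 := by omega
    rw [hn]; simp

lemma pvBucket_getD (ps : List (Int × Char)) (k : Int) :
    (pvBucket ps).getD k [] = (ps.filter (fun p => p.1 == k)).map Prod.snd := by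
  unfold pvBucket
  rw [PySem.Dict.getD_foldl_modify_append]
  simp

lemma mainBucket_pos (g : List String) (rows cols sx : Nat) :
    ((pvMainPairs g rows cols).filter (fun p => p.1 == (sx : Int))).map Prod.snd
    = (List.range (min (cols - sx) rows)).map (fun t => pvCharAt g t (sx + t)) := by
  unfold pvMainPairs
  rw [List.filter_flatMap, List.map_flatMap]
  have hrow : (fun (y : Nat) =>
      ((((List.range cols).map (fun (x : Nat) => ((x : Int) - (y : Int), pvCharAt g y x))).filter
          (fun p => p.1 == (sx : Int))).map Prod.snd))
      = (fun (y : Nat) => if 0 ≤ y ∧ y < cols - sx then [pvCharAt g y (sx + y)] else []) := by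
    funext y
    rw [List.filter_map]
    have hp : ((fun p : Int × Char => p.1 == (sx : Int)) ∘
        (fun (x : Nat) => ((x : Int) - (y : Int), pvCharAt g y x))) = (fun (x : Nat) => x == sx + y) := by
      funext x
      simp only [Function.comp_apply]
      rw [Bool.eq_iff_iff]
      simp only [beq_iff_eq]
      constructor <;> (intro h; omega)
    rw [hp, range_filter_beq]
    by_cases h : sx + y < cols
    · rw [if_pos h, if_pos (by omega)]; simp
    · rw [if_neg h, if_neg (by omega)]; simp
  rw [hrow, flatMap_window]
  simp only [Nat.zero_add, Nat.sub_zero]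

lemma mainBucket_neg (g : List String) (rows cols sy : Nat) :
    ((pvMainPairs g rows cols).filter (fun p => p.1 == -(sy : Int))).map Prod.snd
    = (List.range (min cols (rows - sy))).map (fun t => pvCharAt g (sy + t) t) := by
  unfold pvMainPairs
  rw [List.filter_flatMap, List.map_flatMap]
  have hrow : (fun (y : Nat) =>
      ((((List.range cols).map (fun (x : Nat) => ((x : Int) - (y : Int), pvCharAt g y x))).filter
          (fun p => p.1 == -(sy : Int))).map Prod.snd))
      = (fun (y : Nat) => if sy ≤ y ∧ y < sy + cols then [pvCharAt g y (y - sy)] else []) := by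
    funext y
    rw [List.filter_map]
    by_cases hy : sy ≤ y
    · have hp : ((fun p : Int × Char => p.1 == -(sy : Int)) ∘
          (fun (x : Nat) => ((x : Int) - (y : Int), pvCharAt g y x))) = (fun (x : Nat) => x == y - sy) := by
        funext x
        simp only [Function.comp_apply]
        rw [Bool.eq_iff_iff]
        simp only [beq_iff_eq]
        constructor <;> (intro h; omega)
      rw [hp, range_filter_beq]
      by_cases h : y - sy < cols
      · rw [if_pos h, if_pos (by omega)]; simp
      · rw [if_neg h, if_neg (by omega)]; simp
    · rw [if_neg (by omega)]
      have : ((List.range cols).filter ((fun p : Int × Char => p.1 == -(sy : Int)) ∘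
          (fun (x : Nat) => ((x : Int) - (y : Int), pvCharAt g y x)))) = [] := by
        rw [List.filter_eq_nil_iff]
        intro x _
        simp only [Function.comp_apply, beq_iff_eq]
        omega
      rw [this]; simp
  rw [hrow, flatMap_window]
  have hm : min (sy + cols) rows - sy = min cols (rows - sy) := by omega
  rw [hm]
  apply List.map_congr_left
  intro t _
  congr 1
  omega

lemma antiBucket_eq (g : List String) (rows cols s : Nat) :
    ((pvAntiPairs g rows cols).filter (fun p => p.1 == (s : Int))).map Prod.snd
    = (List.range (min (s + 1) rows - (s + 1 - cols))).map
        (fun t => pvCharAt g (s + 1 - cols + t) (s - (s + 1 - cols + t))) := by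
  unfold pvAntiPairs
  rw [List.filter_flatMap, List.map_flatMap]
  have hrow : (fun (y : Nat) =>
      ((((List.range cols).map (fun (x : Nat) => ((x : Int) + (y : Int), pvCharAt g y x))).filter
          (fun p => p.1 == (s : Int))).map Prod.snd))
      = (fun (y : Nat) => if s + 1 - cols ≤ y ∧ y < s + 1 then [pvCharAt g y (s - y)] else []) := by
    funext y
    rw [List.filter_map]
    by_cases hy : y ≤ s
    · have hp : ((fun p : Int × Char => p.1 == (s : Int)) ∘
          (fun (x : Nat) => ((x : Int) + (y : Int), pvCharAt g y x))) = (fun (x : Nat) => x == s - y) := by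
        funext x
        simp only [Function.comp_apply]
        rw [Bool.eq_iff_iff]
        simp only [beq_iff_eq]
        constructor <;> (intro h; omega)
      rw [hp, range_filter_beq]
      by_cases h : s - y < cols
      · rw [if_pos h, if_pos (by omega)]; simp
      · rw [if_neg h, if_neg (by omega)]; simp
    · rw [if_neg (by omega)]
      have : ((List.range cols).filter ((fun p : Int × Char => p.1 == (s : Int)) ∘
          (fun (x : Nat) => ((x : Int) + (y : Int), pvCharAt g y x)))) = [] := by
        rw [List.filter_eq_nil_iff]
        intro x _
        simp only [Function.comp_apply, beq_iff_eq]
        omega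
      rw [this]; simp
  rw [hrow, flatMap_window]

lemma pvCharAt_reverse (g : List String) (y x : Nat) (h : y < g.length) :
    pvCharAt g.reverse y x = pvCharAt g (g.length - 1 - y) x := by
  unfold pvCharAt
  simp only [List.getD_eq_getElem?_getD, List.getElem?_reverse h]

lemma main_segment (g : List String) (cols : Nat) :
    (pvMainKeys g.length cols).map
      (fun k => String.ofList ((pvBucket (pvMainPairs g g.length cols)).getD k []))
    = (pvDownRange cols).map (fun sx => String.ofList (pvDiagWalk g cols sx 0)) ++
      (List.range g.length).map (fun sy => String.ofList (pvDiagWalk g cols 0 sy)) := by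
  unfold pvMainKeys
  rw [List.map_append, List.map_map, List.map_map]
  congr 1
  · apply List.map_congr_left
    intro sx _
    simp only [Function.comp_apply, Int.ofNat_eq_natCast]
    rw [pvBucket_getD, mainBucket_pos, pvDiagWalk_eq]
    simp
  · apply List.map_congr_left
    intro sy _
    simp only [Function.comp_apply, Int.ofNat_eq_natCast]
    rw [pvBucket_getD, mainBucket_neg, pvDiagWalk_eq]
    simp

lemma anti_segment (g : List String) (cols : Nat)
    (hL : (g.reverse.headD "").toList.length = cols) :
    (pvAntiKeys g.length cols).map
      (fun (k : Nat) => String.ofList (((pvBucket (pvAntiPairs g g.length cols)).getD (k : Int) []).reverse))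
    = (pvDiagonal g.reverse).reverse := by
  have hdiag : pvDiagonal g.reverse =
      (pvDownRange cols).map (fun sx => String.ofList (pvDiagWalk g.reverse cols sx 0)) ++
      (List.range g.length).map (fun sy => String.ofList (pvDiagWalk g.reverse cols 0 sy)) := by
    unfold pvDiagonal
    rw [hL, List.length_reverse]
  rw [hdiag, List.reverse_append]
  unfold pvAntiKeys pvDownRange
  rw [List.map_append, map_range_reverse, ← List.map_reverse, List.reverse_reverse,
    List.range'_eq_map_range, List.range'_eq_map_range, List.map_map, List.map_map]
  congr 1
  · -- first family: anti keys 0..rows-1  vs  reversed (start_y family on g.reverse)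
    apply List.map_congr_left
    intro i hmem
    have hi : i < g.length := by simpa using hmem
    rw [pvBucket_getD, antiBucket_eq, pvDiagWalk_eq, map_range_reverse]
    apply congrArg
    simp only [List.length_reverse]
    have hn : min (i + 1) g.length - (i + 1 - cols)
        = min (cols - 0) (g.length - (g.length - 1 - i)) := by omega
    rw [hn]
    apply List.map_congr_left
    intro t ht
    rw [List.mem_range] at ht
    rw [pvCharAt_reverse g _ _ (by omega)]
    congr 2 <;> omega
  · -- second family: anti keys rows..rows+cols-2  vs  reversed (start_x family on g.reverse)
    apply List.map_congr_left
    intro j hmem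
    have hj : j < cols - 1 := by simpa using hmem
    simp only [Function.comp_apply]
    rw [pvBucket_getD, antiBucket_eq, pvDiagWalk_eq, map_range_reverse]
    apply congrArg
    simp only [List.length_reverse]
    have hn : min (g.length + j + 1) g.length - (g.length + j + 1 - cols)
        = min (cols - (1 + j)) (g.length - 0) := by omega
    rw [hn]
    apply List.map_congr_left
    intro t ht
    rw [List.mem_range] at ht
    rw [pvCharAt_reverse g _ _ (by omega)]
    congr 2 <;> omega

lemma all_lines_eq (g : List String) (hpre : Pre_all_lines g) : all_lines g = all_lines_alt g := by
  obtain ⟨hne, hlast, _hmin⟩ := hpre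
  have hL : (g.reverse.headD "").toList.length = (g.headD "").toList.length := by
    rw [List.headD_eq_head?_getD, List.head?_reverse]
    exact hlast
  have hA : all_lines g =
      (g ++ pvZipCols g ++ pvDiagonal g ++ (pvDiagonal g.reverse).reverse).flatMap
        (fun s => [s, pvRev s]) := rfl
  have h3 : ((pvMainKeys g.length ((g.headD "").toList.length)).flatMap
        (fun k =>
          [String.ofList ((pvBucket (pvMainPairs g g.length ((g.headD "").toList.length))).getD k []),
           pvRev (String.ofList ((pvBucket (pvMainPairs g g.length ((g.headD "").toList.length))).getD k []))]))
      = (pvDiagonal g).flatMap (fun s => [s, pvRev s]) := by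
    have hd : pvDiagonal g =
        (pvMainKeys g.length ((g.headD "").toList.length)).map
          (fun k => String.ofList ((pvBucket (pvMainPairs g g.length ((g.headD "").toList.length))).getD k [])) := by
      unfold pvDiagonal
      exact (main_segment g ((g.headD "").toList.length)).symm
    rw [hd, List.flatMap_map]
  have h4 : ((pvAntiKeys g.length ((g.headD "").toList.length)).flatMap
        (fun (k : Nat) =>
          [String.ofList (((pvBucket (pvAntiPairs g g.length ((g.headD "").toList.length))).getD (k : Int) []).reverse),
           pvRev (String.ofList (((pvBucket (pvAntiPairs g g.length ((g.headD "").toList.length))).getD (k : Int) []).reverse))]))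
      = ((pvDiagonal g.reverse).reverse).flatMap (fun s => [s, pvRev s]) := by
    have hd : (pvDiagonal g.reverse).reverse =
        (pvAntiKeys g.length ((g.headD "").toList.length)).map
          (fun (k : Nat) => String.ofList (((pvBucket (pvAntiPairs g g.length ((g.headD "").toList.length))).getD (k : Int) []).reverse)) :=
      (anti_segment g ((g.headD "").toList.length) hL).symm
    rw [hd, List.flatMap_map]
  have hB : all_lines_alt g =
      (g.flatMap (fun l => [l, pvRev l])) ++
      ((pvZipCols g).flatMap (fun s => [s, pvRev s])) ++
      ((pvMainKeys g.length ((g.headD "").toList.length)).flatMap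
        (fun k =>
          [String.ofList ((pvBucket (pvMainPairs g g.length ((g.headD "").toList.length))).getD k []),
           pvRev (String.ofList ((pvBucket (pvMainPairs g g.length ((g.headD "").toList.length))).getD k []))])) ++
      ((pvAntiKeys g.length ((g.headD "").toList.length)).flatMap
        (fun (k : Nat) =>
          [String.ofList (((pvBucket (pvAntiPairs g g.length ((g.headD "").toList.length))).getD (k : Int) []).reverse),
           pvRev (String.ofList (((pvBucket (pvAntiPairs g g.length ((g.headD "").toList.length))).getD (k : Int) []).reverse))])) := rfl
  rw [hA, hB, List.flatMap_append, List.flatMap_append, List.flatMap_append, h3, h4]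

-- ===== VERDICT (by name: the statement is the Claim_ definition above) =====
theorem all_lines_spec : Claim_equal_all_lines := by
  intro input_lines _hdom hpre
  exact all_lines_eq input_lines hpre
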